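-- pv_equiv track=rewrite | github.com/lebedeffson/document-flow | naudoc_project/Products/CMFNauTools/HTMLCleanup.py | convertTagsAndAttrsToDict
-- ===== SOURCE A (Python) =====
-- def convertTagsAndAttrsToDict( str_with_tags_and_attrs ):
--     """
--         Parses input string and return dictionary
--         where keys are tags and values are attributes.
--
--         Result: dictionary
--     """
--     result = {}
--     attrslist = []
--     for tag_or_attr in str_with_tags_and_attrs.split():
--         if tag_or_attr.isupper():
--             #tag name
--             result[tag_or_attr] = attrslist = []
--         else:
--             #attribute name
--             attrslist.append( tag_or_attr )
--
--     return result
-- ===== SOURCE B (Python) =====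
-- def convertTagsAndAttrsToDict(str_with_tags_and_attrs):
--     """Builds the dict back-to-front: a reverse pass collects each tag's
--     attribute run as one (tag, run) pair, then the dict is filled from the
--     pairs in original order."""
--     pairs = []
--     run = []
--     for tok in reversed(str_with_tags_and_attrs.split()):
--         if tok.isupper():
--             pairs.append((tok, run))
--             run = []
--         else:
--             run = [tok] + run
--     result = {}
--     for tag, attrs in reversed(pairs):
--         result[tag] = attrs
--     return result
-- ===== Notes on version B (the rewrite author's own statement) =====
-- stated objective: alternative
-- what changed: B replaces A's forward pass that mutates a shared attribute list aliased into the dict by a reverse pass that collects each tag's whole attribute run as one (tag, run) pair and then fills the dict from the pairs in original order.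
import Mathlib
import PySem

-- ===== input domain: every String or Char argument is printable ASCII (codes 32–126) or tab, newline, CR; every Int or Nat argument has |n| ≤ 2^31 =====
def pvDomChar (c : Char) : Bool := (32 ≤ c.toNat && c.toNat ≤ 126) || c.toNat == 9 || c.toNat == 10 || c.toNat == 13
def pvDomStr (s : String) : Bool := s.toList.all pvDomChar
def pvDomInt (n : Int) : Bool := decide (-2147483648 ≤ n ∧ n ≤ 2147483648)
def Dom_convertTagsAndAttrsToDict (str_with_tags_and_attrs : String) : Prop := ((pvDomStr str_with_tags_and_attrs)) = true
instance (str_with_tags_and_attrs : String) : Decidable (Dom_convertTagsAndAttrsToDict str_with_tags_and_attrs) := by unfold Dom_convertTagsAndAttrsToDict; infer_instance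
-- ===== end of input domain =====

-- B builds the result back-to-front (a reverse pass collecting (tag, attr-run) pairs, then a
-- dict fill in original order) instead of A's forward pass mutating a shared attribute list;
-- objective: alternative decomposition, same cost.

-- ===== PORT A =====
-- hand port of Python str.isupper(): at least one cased character and no lowercase one
-- (exact on the ASCII domain, where the cased characters are exactly the letters)
def pyStrIsupper (s : String) : Bool :=
  (s.toList.any (fun c => PySem.Chars.isupper c || PySem.Chars.islower c)) &&
  (s.toList.all (fun c => !PySem.Chars.islower c))

-- A's loop state: the dict under construction and the tag whose (aliased) attribute list
-- `attrslist` currently lives in the dict (none before the first tag: appends are discarded).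
def stepA (st : PySem.Dict String (List String) × Option String) (tok : String) :
    PySem.Dict String (List String) × Option String :=
  if pyStrIsupper tok then (st.1.insert tok [], some tok)
  else
    match st.2 with
    | none => st
    | some t => (st.1.modify t [] (fun l => l ++ [tok]), some t)

def convertTagsAndAttrsToDict (str_with_tags_and_attrs : String) : List (String × List String) :=
  (((PySem.Str.split₀ str_with_tags_and_attrs).foldl stepA (PySem.Dict.empty, none)).1).items

-- ===== PORT B =====
def stepB (st : List (String × List String) × List String) (tok : String) :
    List (String × List String) × List String :=
  if pyStrIsupper tok then (st.1 ++ [(tok, st.2)], [])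
  else (st.1, tok :: st.2)

def convertTagsAndAttrsToDict_alt (str_with_tags_and_attrs : String) : List (String × List String) :=
  let toks := PySem.Str.split₀ str_with_tags_and_attrs
  let pr := toks.reverse.foldl stepB ([], [])
  ((pr.1.reverse.foldl (fun (d : PySem.Dict String (List String)) kv => d.insert kv.1 kv.2)
      PySem.Dict.empty)).items

-- ===== PRECONDITION & SPEC =====
def Spec_convertTagsAndAttrsToDict (str_with_tags_and_attrs : String) (out : List (String × List String)) : Prop := out = convertTagsAndAttrsToDict_alt str_with_tags_and_attrs
instance (str_with_tags_and_attrs : String) (out : List (String × List String)) : Decidable (Spec_convertTagsAndAttrsToDict str_with_tags_and_attrs out) := by unfold Spec_convertTagsAndAttrsToDict; infer_instance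

-- ===== CLAIM (what is proved, stated in full; the proofs are below) =====
def Claim_equal_convertTagsAndAttrsToDict : Prop := ∀ (str_with_tags_and_attrs : String), Dom_convertTagsAndAttrsToDict str_with_tags_and_attrs → Spec_convertTagsAndAttrsToDict str_with_tags_and_attrs (convertTagsAndAttrsToDict str_with_tags_and_attrs)

-- ===== LEMMAS AND PROOFS =====

-- the common shape both ports compute: the (tag, attribute-run) segments of the token list
def segs : List String → List (String × List String)
  | [] => []
  | x :: xs =>
    if pyStrIsupper x then
      (x, xs.takeWhile (fun t => !pyStrIsupper t)) :: segs (xs.dropWhile (fun t => !pyStrIsupper t))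
    else segs xs
termination_by l => l.length
decreasing_by
  · have := List.length_dropWhile_le (fun t => !pyStrIsupper t) xs
    simp; omega
  · simp

def fromSegs (d : PySem.Dict String (List String)) (l : List (String × List String)) :
    PySem.Dict String (List String) :=
  l.foldl (fun d kv => d.insert kv.1 kv.2) d

theorem segs_dropWhile (xs : List String) :
    segs (xs.dropWhile (fun t => !pyStrIsupper t)) = segs xs := by
  induction xs with
  | nil => rfl
  | cons x xs ih =>
    by_cases h : pyStrIsupper x = true
    · simp [List.dropWhile, h]
    · simp only [Bool.not_eq_true] at h
      simp [List.dropWhile, h, segs, ih]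

theorem modify_insert_self (d : PySem.Dict String (List String)) (t : String)
    (v : List String) (f : List String → List String) :
    (d.insert t v).modify t [] f = d.insert t (f v) := by
  unfold PySem.Dict.modify
  rw [PySem.Dict.getD_insert_self, PySem.Dict.insert_insert_self]

theorem runA (xs : List String) : ∀ (d : PySem.Dict String (List String)) (t : String)
    (v : List String),
    (xs.foldl stepA (d.insert t v, some t)).1 =
      fromSegs (d.insert t (v ++ xs.takeWhile (fun t => !pyStrIsupper t)))
        (segs (xs.dropWhile (fun t => !pyStrIsupper t))) := by
  induction xs with
  | nil => intro d t v; simp [fromSegs, segs]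
  | cons x xs ih =>
    intro d t v
    by_cases h : pyStrIsupper x = true
    · simp only [List.foldl_cons, stepA, h, if_pos, List.takeWhile, List.dropWhile,
        Bool.not_true]
      rw [ih (d.insert t v) x []]
      simp [segs, h, fromSegs]
    · simp only [Bool.not_eq_true] at h
      simp only [List.foldl_cons, stepA, h, Bool.false_eq_true, if_false,
        List.takeWhile, List.dropWhile, Bool.not_false]
      rw [modify_insert_self, ih d t (v ++ [x])]
      simp

theorem mainA (xs : List String) : ∀ (d : PySem.Dict String (List String)),
    (xs.foldl stepA (d, none)).1 = fromSegs d (segs xs) := by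
  induction xs with
  | nil => intro d; simp [fromSegs, segs]
  | cons x xs ih =>
    intro d
    by_cases h : pyStrIsupper x = true
    · simp only [List.foldl_cons, stepA, h, if_pos]
      rw [runA xs d x []]
      simp [segs, h, fromSegs]
    · simp only [List.foldl_cons, stepA, h, Bool.false_eq_true, if_false]
      rw [ih d]
      simp [segs, h]

theorem revB (xs : List String) :
    xs.reverse.foldl stepB ([], []) =
      ((segs xs).reverse, xs.takeWhile (fun t => !pyStrIsupper t)) := by
  induction xs with
  | nil => simp [segs]
  | cons x xs ih =>
    rw [List.reverse_cons, List.foldl_append, ih]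
    by_cases h : pyStrIsupper x = true
    · simp [stepB, h, segs, segs_dropWhile, List.takeWhile]
    · simp only [Bool.not_eq_true] at h
      simp [stepB, h, segs, List.takeWhile]

-- ===== VERDICT (by name: the statement is the Claim_ definition above) =====
theorem convertTagsAndAttrsToDict_spec : Claim_equal_convertTagsAndAttrsToDict := by
  intro s _
  unfold Spec_convertTagsAndAttrsToDict convertTagsAndAttrsToDict convertTagsAndAttrsToDict_alt
  simp only [mainA, revB, fromSegs]
  simp
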